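-- pv_equiv track=rewrite | github.com/AlexeySorokin/NeuralMorphemeSegmentation | neural/common.py | collect_buckets
-- ===== SOURCE A (Python) =====
-- import bisect
-- from itertools import chain
--
-- def make_bucket_lengths(lengths, buckets_number=None, max_bucket_length=None):
--     m = len(lengths)
--     lengths = sorted(lengths)
--     last_bucket_length, bucket_lengths = 0, []
--     if buckets_number is None:
--         if max_bucket_length is not None:
--             buckets_number = (m - 1) // max_bucket_length + 1
--         else:
--             raise ValueError("Either buckets_number or max_bucket_length must be given.")
--     for i in range(buckets_number):
--         # могут быть проблемы с выбросами большой длины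
--         level = (m * (i + 1) // buckets_number) - 1
--         curr_length = lengths[level]
--         if curr_length > last_bucket_length:
--             bucket_lengths.append(curr_length)
--             last_bucket_length = curr_length
--     return bucket_lengths
--
-- def collect_buckets(lengths, buckets_number=None, max_bucket_length=-1):
--     bucket_lengths = make_bucket_lengths(lengths, buckets_number, max_bucket_length)
--     indexes = [[] for length in bucket_lengths]
--     for i, length in enumerate(lengths):
--         index = bisect.bisect_left(bucket_lengths, length)
--         indexes[index].append(i)
--     if max_bucket_length != -1:
--         bucket_lengths = list(chain.from_iterable(
--             ([L] * ((len(curr_indexes)-1) // max_bucket_length + 1))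
--             for L, curr_indexes in zip(bucket_lengths, indexes)
--             if len(curr_indexes) > 0))
--         indexes = [curr_indexes[start:start+max_bucket_length]
--                    for curr_indexes in indexes
--                    for start in range(0, len(curr_indexes), max_bucket_length)]
--     return [(L, curr_indexes) for L, curr_indexes
--             in zip(bucket_lengths, indexes) if len(curr_indexes) > 0]
-- ===== SOURCE B (Python) =====
-- def make_bucket_lengths(lengths, buckets_number=None, max_bucket_length=None):
--     m = len(lengths)
--     lengths = sorted(lengths)
--     last_bucket_length, bucket_lengths = 0, []
--     if buckets_number is None:
--         if max_bucket_length is not None: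
--             buckets_number = (m - 1) // max_bucket_length + 1
--         else:
--             raise ValueError("Either buckets_number or max_bucket_length must be given.")
--     for i in range(buckets_number):
--         level = (m * (i + 1) // buckets_number) - 1
--         curr_length = lengths[level]
--         if curr_length > last_bucket_length:
--             bucket_lengths.append(curr_length)
--             last_bucket_length = curr_length
--     return bucket_lengths
--
--
-- def collect_buckets(lengths, buckets_number=None, max_bucket_length=-1):
--     bucket_lengths = make_bucket_lengths(lengths, buckets_number, max_bucket_length)
--     result, prev = [], None
--     for L in bucket_lengths:
--         # each bucket holds the indexes whose length falls in the half-open interval (prev, L]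
--         idx = [i for i, x in enumerate(lengths)
--                if x <= L and (prev is None or prev < x)]
--         prev = L
--         if max_bucket_length == -1:
--             if idx:
--                 result.append((L, idx))
--         else:
--             for start in range(0, len(idx), max_bucket_length):
--                 result.append((L, idx[start:start + max_bucket_length]))
--     return result
-- ===== Notes on version B (the rewrite author's own statement) =====
-- stated objective: alternative
-- what changed: B keeps make_bucket_lengths but replaces A's per-element bisect scatter followed by the zip/chain/slice reassembly with a single pass over the buckets that gathers, for each bucket boundary L, the indexes whose length lies in the half-open interval (prev, L] and emits that bucket's chunks directly; Pre_ excludes only inputs on which A raises (ZeroDivisionError for max_bucket_length 0 with buckets_number None, ValueError from a zero step when splitting, IndexError when the bucket list comes out empty or lengths is empty with a positive bucket count).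
import Mathlib
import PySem

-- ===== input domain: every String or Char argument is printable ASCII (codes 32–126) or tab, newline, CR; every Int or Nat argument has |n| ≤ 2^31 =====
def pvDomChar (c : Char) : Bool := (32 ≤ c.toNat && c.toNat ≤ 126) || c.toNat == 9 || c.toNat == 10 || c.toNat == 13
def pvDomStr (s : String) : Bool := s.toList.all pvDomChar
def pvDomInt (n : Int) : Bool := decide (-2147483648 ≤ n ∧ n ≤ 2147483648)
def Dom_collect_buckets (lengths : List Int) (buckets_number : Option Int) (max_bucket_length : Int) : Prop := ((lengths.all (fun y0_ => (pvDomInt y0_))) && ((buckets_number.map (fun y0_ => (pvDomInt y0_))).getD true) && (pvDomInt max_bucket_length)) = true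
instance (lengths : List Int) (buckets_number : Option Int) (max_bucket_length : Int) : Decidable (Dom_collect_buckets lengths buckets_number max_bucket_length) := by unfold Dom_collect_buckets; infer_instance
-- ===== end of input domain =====

-- B keeps make_bucket_lengths but replaces A's per-element bisect scatter plus the zip/chain/slice
-- reassembly with one pass over the buckets that gathers each bucket's half-open interval of
-- lengths (prev, L] and emits its chunks directly (objective: alternative decomposition).

-- ===== PORT A =====
-- s[(m*(i+1))//bn - 1]  (Python's negative-index wraparound is pyGetD's; Python A binds it to curr_length)
def pvPick (s : List Int) (m bn i : Int) : Int :=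
  PySem.List.pyGetD s (PySem.Int.floordiv (m * (i + 1)) bn - 1) 0

-- the quantile loop of make_bucket_lengths, after buckets_number has been resolved
def pvMBLcore (lengths : List Int) (bn : Int) : List Int :=
  let m : Int := lengths.length
  let s := PySem.List.sorted lengths (fun x => x)
  ((PySem.List.pyRange 0 bn 1).foldl
    (fun st i => if st.1 < pvPick s m bn i then (pvPick s m bn i, st.2 ++ [pvPick s m bn i]) else st)
    ((0 : Int), ([] : List Int))).2

-- make_bucket_lengths (shared verbatim by both Python versions)
def pvMakeBucketLengths (lengths : List Int) (buckets_number : Option Int) (max_bucket_length : Int) : List Int :=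
  pvMBLcore lengths (match buckets_number with
    | some b => b
    | none => PySem.Int.floordiv ((lengths.length : Int) - 1) max_bucket_length + 1)

-- everything of A's collect_buckets after bucket_lengths is known: the bisect scatter, the optional
-- splitting into chunks of max_bucket_length, and the final zip/filter
def pvAssembleA (lengths : List Int) (max_bucket_length : Int) (bl : List Int) : List (Int × List Int) :=
  let indexes0 : List (List Int) := bl.map (fun _ => ([] : List Int))
  let indexes := (PySem.List.enumerate lengths).foldl
    (fun idxs p =>
      PySem.List.pySetD idxs ((PySem.List.bisectLeft bl p.2 : Nat) : Int)
        (PySem.List.pyGetD idxs ((PySem.List.bisectLeft bl p.2 : Nat) : Int) [] ++ [p.1]))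
    indexes0
  if max_bucket_length ≠ -1 then
    let blC := ((bl.zip indexes).filter (fun p => decide (0 < p.2.length))).flatMap
        (fun p => List.replicate (PySem.Int.floordiv ((p.2.length : Int) - 1) max_bucket_length + 1).toNat p.1)
    let idxC := indexes.flatMap (fun ci =>
        (PySem.List.pyRange 0 (ci.length : Int) max_bucket_length).map (fun st =>
          PySem.List.slice ci (some st) (some (st + max_bucket_length))))
    (blC.zip idxC).filter (fun p => decide (0 < p.2.length))
  else
    (bl.zip indexes).filter (fun p => decide (0 < p.2.length))

def collect_buckets (lengths : List Int) (buckets_number : Option Int) (max_bucket_length : Int) : List (Int × List Int) :=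
  pvAssembleA lengths max_bucket_length (pvMakeBucketLengths lengths buckets_number max_bucket_length)

-- ===== PORT B =====
-- B's single pass over the buckets: gather each bucket's half-open interval (prev, L] of lengths,
-- emit its chunks directly; state = (prev, result)
def pvGatherB (lengths : List Int) (max_bucket_length : Int) (bl : List Int) : List (Int × List Int) :=
  (bl.foldl (fun st L =>
      let idx := ((PySem.List.enumerate lengths).filter (fun p =>
          decide (p.2 ≤ L) && (match st.1 with
            | none => true
            | some pv => decide (pv < p.2)))).map (fun p => p.1)
      (some L,
        if max_bucket_length = -1 then (if idx.isEmpty then st.2 else st.2 ++ [(L, idx)])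
        else st.2 ++ (PySem.List.pyRange 0 (idx.length : Int) max_bucket_length).map (fun start =>
          (L, PySem.List.slice idx (some start) (some (start + max_bucket_length))))))
    ((none : Option Int), ([] : List (Int × List Int)))).2

def collect_buckets_alt (lengths : List Int) (buckets_number : Option Int) (max_bucket_length : Int) : List (Int × List Int) :=
  pvGatherB lengths max_bucket_length (pvMakeBucketLengths lengths buckets_number max_bucket_length)

-- the effective buckets_number, for the precondition
def pvEffBn (lengths : List Int) (buckets_number : Option Int) (max_bucket_length : Int) : Int :=
  match buckets_number with
  | some b => b
  | none => PySem.Int.floordiv ((lengths.length : Int) - 1) max_bucket_length + 1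

-- ===== PRECONDITION & SPEC =====
-- Pre_ admits exactly the inputs on which Python A returns: it excludes the ZeroDivisionError
-- (buckets_number None with max_bucket_length 0), the ValueError of range(.., 0) when splitting a
-- nonempty input with max_bucket_length 0, and the IndexErrors of an empty lengths list with an
-- effective positive buckets_number, of a nonpositive effective buckets_number on a nonempty list,
-- and of a nonempty list whose maximum is ≤ 0 (then bucket_lengths misses it and the bisect index
-- overruns).
def Pre_collect_buckets (lengths : List Int) (buckets_number : Option Int) (max_bucket_length : Int) : Prop :=
  (buckets_number = none → max_bucket_length ≠ 0) ∧
  (if lengths = [] then pvEffBn lengths buckets_number max_bucket_length ≤ 0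
   else max_bucket_length ≠ 0 ∧ 1 ≤ pvEffBn lengths buckets_number max_bucket_length ∧ ∃ x ∈ lengths, 0 < x)
instance (lengths : List Int) (buckets_number : Option Int) (max_bucket_length : Int) : Decidable (Pre_collect_buckets lengths buckets_number max_bucket_length) := by unfold Pre_collect_buckets; infer_instance

def pvWitness_collect_buckets : List Int × Option Int × Int := ([3, 1, 2], some 2, -1)

def Spec_collect_buckets (lengths : List Int) (buckets_number : Option Int) (max_bucket_length : Int) (out : List (Int × List Int)) : Prop := out = collect_buckets_alt lengths buckets_number max_bucket_length
instance (lengths : List Int) (buckets_number : Option Int) (max_bucket_length : Int) (out : List (Int × List Int)) : Decidable (Spec_collect_buckets lengths buckets_number max_bucket_length out) := by unfold Spec_collect_buckets; infer_instance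

-- ===== CLAIM (what is proved, stated in full; the proofs are below) =====
def Claim_equal_collect_buckets : Prop := ∀ (lengths : List Int) (buckets_number : Option Int) (max_bucket_length : Int), Dom_collect_buckets lengths buckets_number max_bucket_length → Pre_collect_buckets lengths buckets_number max_bucket_length → Spec_collect_buckets lengths buckets_number max_bucket_length (collect_buckets lengths buckets_number max_bucket_length)

-- ===== LEMMAS AND PROOFS =====

-- the strictly increasing "record" subsequence of the picks, as A's fold builds it
def pvRecs : Int → List Int → List Int
  | _, [] => []
  | t, p :: ps => if t < p then p :: pvRecs p ps else pvRecs t ps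

def pvLast : Int → List Int → Int
  | t, [] => t
  | t, p :: ps => if t < p then pvLast p ps else pvLast t ps

theorem pvFoldPick (f : Int → Int) (l : List Int) : ∀ (t : Int) (acc : List Int),
    l.foldl (fun st i => if st.1 < f i then (f i, st.2 ++ [f i]) else st) (t, acc)
      = (pvLast t (l.map f), acc ++ pvRecs t (l.map f)) := by
  induction l with
  | nil => intro t acc; simp [pvRecs, pvLast]
  | cons a l ih =>
      intro t acc
      by_cases h : t < f a <;> simp [pvRecs, pvLast, h, ih]

theorem pvRecs_gt (P : List Int) : ∀ (t : Int), ∀ x ∈ pvRecs t P, t < x := by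
  induction P with
  | nil => intro t x hx; simp [pvRecs] at hx
  | cons p ps ih =>
      intro t x hx
      by_cases h : t < p
      · simp only [pvRecs, if_pos h, List.mem_cons] at hx
        rcases hx with rfl | hx
        · exact h
        · have := ih p x hx; omega
      · simp only [pvRecs, if_neg h] at hx
        exact ih t x hx

theorem pvRecs_pw (P : List Int) : ∀ (t : Int), (pvRecs t P).Pairwise (· < ·) := by
  induction P with
  | nil => intro t; simp [pvRecs]
  | cons p ps ih =>
      intro t
      by_cases h : t < p
      · simp only [pvRecs, if_pos h]
        exact List.pairwise_cons.mpr ⟨fun x hx => pvRecs_gt ps p x hx, ih p⟩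
      · simp only [pvRecs, if_neg h]
        exact ih t

theorem pvLast_ge_self (P : List Int) : ∀ (t : Int), t ≤ pvLast t P := by
  induction P with
  | nil => intro t; simp [pvLast]
  | cons p ps ih =>
      intro t
      by_cases h : t < p
      · simp only [pvLast, if_pos h]
        have := ih p; omega
      · simp only [pvLast, if_neg h]
        exact ih t

theorem pvLast_ge (P : List Int) : ∀ (t : Int), ∀ p ∈ P, p ≤ pvLast t P := by
  induction P with
  | nil => intro t p hp; simp at hp
  | cons q ps ih =>
      intro t p hp
      rcases List.mem_cons.mp hp with rfl | hp
      · by_cases h : t < p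
        · simp only [pvLast, if_pos h]; exact pvLast_ge_self ps p
        · simp only [pvLast, if_neg h]
          have := pvLast_ge_self ps t; omega
      · by_cases h : t < q
        · simp only [pvLast, if_pos h]; exact ih q p hp
        · simp only [pvLast, if_neg h]; exact ih t p hp

theorem pvLast_mem (P : List Int) : ∀ (t : Int), t < pvLast t P → pvLast t P ∈ pvRecs t P := by
  induction P with
  | nil => intro t h; simp [pvLast] at h
  | cons p ps ih =>
      intro t h
      by_cases hp : t < p
      · simp only [pvLast, if_pos hp] at h ⊢
        simp only [pvRecs, if_pos hp, List.mem_cons]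
        by_cases h2 : p < pvLast p ps
        · exact Or.inr (ih p h2)
        · have := pvLast_ge_self ps p
          exact Or.inl (by omega)
      · simp only [pvLast, if_neg hp] at h ⊢
        simp only [pvRecs, if_neg hp]
        exact ih t h

-- every element of a key-sorted list is ≤ its last element
theorem pvSorted_le_getLast (xs : List Int) (h : PySem.List.sorted xs (fun x => x) ≠ [])
    (x : Int) (hx : x ∈ PySem.List.sorted xs (fun x => x)) :
    x ≤ (PySem.List.sorted xs (fun x => x)).getLast h := by
  obtain ⟨k, hk, hx⟩ := List.mem_iff_getElem.mp hx
  rw [List.getLast_eq_getElem]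
  subst hx
  exact PySem.List.key_sorted_getElem_mono xs (fun x => x) (by omega) (by omega)

-- characterisation of bisect_left on a ≤-sorted list
theorem pvBisect_eq_iff (bl : List Int) (hs : bl.Pairwise (· ≤ ·)) (x : Int) (j : Nat)
    (hj : j < bl.length) :
    PySem.List.bisectLeft bl x = j ↔
      (x ≤ bl[j] ∧ (j = 0 ∨ bl[j - 1]! < x)) := by
  obtain ⟨hle, hlt, hge⟩ := PySem.List.bisectLeft_spec bl x hs
  constructor
  · intro hb
    refine ⟨hge j hj (by omega), ?_⟩
    rcases Nat.eq_zero_or_pos j with h0 | h0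
    · exact Or.inl h0
    · refine Or.inr ?_
      rw [getElem!_pos bl (j - 1) (by omega)]
      exact hlt (j - 1) (by omega) (by omega)
  · rintro ⟨h1, h2⟩
    by_contra hne
    rcases Nat.lt_or_ge (PySem.List.bisectLeft bl x) j with hc | hc
    · have hj1 : j - 1 < bl.length := by omega
      have := hge (j - 1) hj1 (by omega)
      rcases h2 with h0 | h2
      · omega
      · rw [getElem!_pos bl (j - 1) hj1] at h2
        omega
    · have hc' : j < PySem.List.bisectLeft bl x := by omega
      have := hlt j hj hc'
      omega

-- the scatter fold, characterised pointwise
theorem pvScatter (g : Int → Nat) (ps : List (Int × Int)) :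
    ∀ (init : List (List Int)), (∀ p ∈ ps, g p.2 < init.length) →
    (ps.foldl (fun idxs p =>
        PySem.List.pySetD idxs ((g p.2 : Nat) : Int)
          (PySem.List.pyGetD idxs ((g p.2 : Nat) : Int) [] ++ [p.1])) init).length = init.length ∧
    ∀ (j : Nat), j < init.length →
      (ps.foldl (fun idxs p =>
        PySem.List.pySetD idxs ((g p.2 : Nat) : Int)
          (PySem.List.pyGetD idxs ((g p.2 : Nat) : Int) [] ++ [p.1])) init).getD j []
        = init.getD j [] ++ ((ps.filter (fun p => g p.2 == j)).map (fun p => p.1)) := by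
  induction ps with
  | nil => intro init _; simp
  | cons p t ih =>
      intro init hcov
      have hp : g p.2 < init.length := hcov p (by simp)
      rw [List.foldl_cons]
      have hset : PySem.List.pySetD init ((g p.2 : Nat) : Int)
          (PySem.List.pyGetD init ((g p.2 : Nat) : Int) [] ++ [p.1])
          = init.set (g p.2) (init.getD (g p.2) [] ++ [p.1]) := by
        simp
      rw [hset]
      set init' : List (List Int) := init.set (g p.2) (init.getD (g p.2) [] ++ [p.1]) with hinit'
      have hlen' : init'.length = init.length := by simp [hinit']
      have hcov' : ∀ q ∈ t, g q.2 < init'.length := by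
        intro q hq; rw [hlen']; exact hcov q (by simp [hq])
      obtain ⟨ihl, ihg⟩ := ih init' hcov'
      refine ⟨by rw [ihl, hlen'], ?_⟩
      intro j hj
      rw [ihg j (by omega)]
      have hget : init'.getD j [] =
          if g p.2 = j then init.getD j [] ++ [p.1] else init.getD j [] := by
        rw [hinit']
        by_cases h : g p.2 = j
        · subst h
          simp [List.getD_eq_getElem?_getD, hp]
        · simp [h, List.getD_eq_getElem?_getD, List.getElem?_set_ne h]
      rw [hget, List.filter_cons]
      by_cases h : g p.2 = j
      · simp [h, List.append_assoc]
      · have : (g p.2 == j) = false := by simp [h]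
        simp [this, h]

theorem pvZipRangeMap {α β : Type} (l : List α) (g : Nat → β) : ∀ (k : Nat),
    l.zip ((List.range l.length).map (fun j => g (j + k)))
      = (l.zipIdx k).map (fun p => (p.1, g p.2)) := by
  induction l with
  | nil => intro k; simp
  | cons a t ih =>
      intro k
      simp only [List.length_cons, List.range_succ_eq_map, List.map_cons, List.map_map,
        List.zip_cons_cons, List.zipIdx_cons, List.map_cons]
      have h1 : ((fun j => g (j + k)) ∘ Nat.succ) = fun j => g (j + (k + 1)) := by
        funext j
        simp only [Function.comp]
        congr 1
        omega
      rw [h1, ih (k + 1)]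
      simp

theorem pvFilterEqFlatMap {α : Type} (l : List α) (q : α → Bool) :
    l.filter q = l.flatMap (fun a => if q a then [a] else []) := by
  induction l with
  | nil => rfl
  | cons a t ih => by_cases h : q a <;> simp [h, ih]

theorem pvFilterFlatMap {α β : Type} (l : List α) (q : α → Bool) (g : α → List β) :
    (l.filter q).flatMap g = l.flatMap (fun a => if q a then g a else []) := by
  induction l with
  | nil => rfl
  | cons a t ih => by_cases h : q a <;> simp [h, ih]

theorem pvZipReplicate {α β : Type} (ys : List β) (a : α) :
    (List.replicate ys.length a).zip ys = ys.map (fun y => (a, y)) := by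
  induction ys with
  | nil => rfl
  | cons y t ih => simp [List.replicate_succ, ih]

theorem pvZipFlat {α β γ : Type} (l : List (α × β)) (cnt : β → List γ) :
    (l.flatMap (fun p => List.replicate (cnt p.2).length p.1)).zip
        (l.flatMap (fun p => cnt p.2))
      = l.flatMap (fun p => (cnt p.2).map (fun c => (p.1, c))) := by
  induction l with
  | nil => rfl
  | cons p t ih =>
      simp only [List.flatMap_cons]
      rw [List.zip_append (by simp), ih, pvZipReplicate]

theorem pvPyRangeNegEmpty (n s : Int) (hn : 0 ≤ n) (hs : s < 0) :
    PySem.List.pyRange 0 n s = [] := by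
  simp only [PySem.List.pyRange]
  have h1 : ¬ s = 0 := by omega
  have h2 : ¬ 0 < s := by omega
  have h3 : ¬ n < 0 := by omega
  simp [h1, h2, h3]

-- B's gather loop, abstractly
def pvIdxOf (lengths : List Int) (pv : Option Int) (L : Int) : List Int :=
  ((PySem.List.enumerate lengths).filter (fun p =>
      decide (p.2 ≤ L) && (match pv with
        | none => true
        | some v => decide (v < p.2)))).map (fun p => p.1)

def pvChunkB (mbl L : Int) (idx : List Int) : List (Int × List Int) :=
  if mbl = -1 then (if idx.isEmpty then [] else [(L, idx)])
  else (PySem.List.pyRange 0 (idx.length : Int) mbl).map (fun start =>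
    (L, PySem.List.slice idx (some start) (some (start + mbl))))

def pvGaux (lengths : List Int) (mbl : Int) : Option Int → List Int → List (Int × List Int)
  | _, [] => []
  | pv, L :: r => pvChunkB mbl L (pvIdxOf lengths pv L) ++ pvGaux lengths mbl (some L) r

theorem pvFoldGaux (lengths : List Int) (mbl : Int) (bl : List Int) :
    ∀ (pv : Option Int) (acc : List (Int × List Int)),
    (bl.foldl (fun st L =>
      let idx := ((PySem.List.enumerate lengths).filter (fun p =>
          decide (p.2 ≤ L) && (match st.1 with
            | none => true
            | some pv => decide (pv < p.2)))).map (fun p => p.1)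
      ((some L : Option Int),
        if mbl = -1 then (if idx.isEmpty then st.2 else st.2 ++ [(L, idx)])
        else st.2 ++ (PySem.List.pyRange 0 (idx.length : Int) mbl).map (fun start =>
          (L, PySem.List.slice idx (some start) (some (start + mbl)))))) (pv, acc)).2
      = acc ++ pvGaux lengths mbl pv bl := by
  induction bl with
  | nil => intro pv acc; simp [pvGaux]
  | cons L r ih =>
      intro pv acc
      simp only [List.foldl_cons, ih, pvGaux, pvChunkB, pvIdxOf]
      by_cases h : mbl = -1
      · simp only [if_pos h]
        by_cases he : (((PySem.List.enumerate lengths).filter (fun p =>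
            decide (p.2 ≤ L) && (match pv with
              | none => true
              | some v => decide (v < p.2)))).map (fun p => p.1)).isEmpty
        · simp [he]
        · simp [he]
      · simp [if_neg h]

-- the per-bucket interval gather equals the bisect classification, bucket by bucket
theorem pvMainGather (lengths bl : List Int) (mbl : Int) (hpw : bl.Pairwise (· ≤ ·)) :
    ∀ (todo : List Int) (k : Nat) (pv : Option Int),
      bl.drop k = todo →
      (pv = if k = 0 then none else some (bl[k - 1]!)) →
      ((todo.zipIdx k).map (fun p => (p.1, ((PySem.List.enumerate lengths).filter
          (fun q => PySem.List.bisectLeft bl q.2 == p.2)).map (fun q => q.1)))).flatMap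
        (fun q => pvChunkB mbl q.1 q.2)
      = pvGaux lengths mbl pv todo := by
  intro todo
  induction todo with
  | nil => intro k pv _ _; simp [pvGaux]
  | cons L rest ih =>
      intro k pv hdrop hpv
      have hk : k < bl.length := by
        have := congrArg List.length hdrop
        simp at this
        omega
      have hblk : bl[k] = L := by
        have h0 : (bl.drop k)[0]'(by rw [hdrop]; simp) = L := by
          simp [hdrop]
        rw [List.getElem_drop] at h0
        simpa using h0
      have hdrop' : bl.drop (k + 1) = rest := by
        have : bl.drop (k + 1) = (bl.drop k).drop 1 := by
          rw [List.drop_drop]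
        rw [this, hdrop]
        simp
      have hhead : ((PySem.List.enumerate lengths).filter
            (fun q => PySem.List.bisectLeft bl q.2 == k)).map (fun q => q.1)
          = pvIdxOf lengths pv L := by
        unfold pvIdxOf
        congr 1
        apply List.filter_congr
        intro q _
        have hiff := pvBisect_eq_iff bl hpw q.2 k hk
        rw [hblk] at hiff
        rcases Nat.eq_zero_or_pos k with h0 | h0
        · subst h0
          simp at hpv
          subst hpv
          simp only [Bool.and_true]
          rw [Bool.eq_iff_iff]
          simp only [beq_iff_eq, decide_eq_true_eq]
          rw [hiff]
          simp
        · have hk0 : ¬ k = 0 := by omega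
          rw [if_neg hk0] at hpv
          subst hpv
          rw [Bool.eq_iff_iff]
          simp only [beq_iff_eq, Bool.and_eq_true, decide_eq_true_eq]
          rw [hiff]
          constructor
          · rintro ⟨h1, h2 | h2⟩
            · omega
            · exact ⟨h1, h2⟩
          · rintro ⟨h1, h2⟩
            exact ⟨h1, Or.inr h2⟩
      simp only [List.zipIdx_cons, List.map_cons, List.flatMap_cons, pvGaux, hhead]
      congr 1
      exact ih (k + 1) (some L) hdrop' (by
        rw [if_neg (by omega)]
        congr 1
        simp only [Nat.add_sub_cancel]
        rw [getElem!_pos bl k hk]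
        exact hblk.symm)

theorem pvGauxEmptyChunks (lengths : List Int) (mbl : Int) (h1 : ¬ mbl = -1)
    (hrz : ∀ n : Int, 0 ≤ n → PySem.List.pyRange 0 n mbl = []) :
    ∀ (l : List Int) (pv : Option Int), pvGaux lengths mbl pv l = [] := by
  intro l
  induction l with
  | nil => intro pv; rfl
  | cons L r ih =>
      intro pv
      simp only [pvGaux, pvChunkB, if_neg h1, ih (some L)]
      rw [hrz _ (by positivity)]
      simp

theorem pvPyRangeZero (a b : Int) : PySem.List.pyRange a b 0 = [] := by
  simp [PySem.List.pyRange]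

theorem pvZipRangeMap0 {α β : Type} (l : List α) (g : Nat → β) :
    l.zip ((List.range l.length).map g) = l.zipIdx.map (fun p => (p.1, g p.2)) := by
  have h := pvZipRangeMap l g 0
  simpa using h

theorem pvChunkCount (n mbl : Int) (hn : 0 ≤ n) (hm : 0 < mbl) :
    (PySem.List.pyRange 0 n mbl).length = (PySem.Int.floordiv (n - 1) mbl + 1).toNat := by
  rw [PySem.List.pyRange_of_pos 0 n hm]
  simp only [List.length_map, List.length_range]
  by_cases h : (0:Int) < n
  · rw [if_pos h]
    rw [PySem.Int.floordiv_eq_ediv_of_pos hm]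
    have h2 : (n - 0 + mbl - 1) = (n - 1) + 1 * mbl := by ring
    rw [h2, Int.add_mul_ediv_right _ _ (by omega : mbl ≠ 0)]
  · rw [if_neg h]
    have hn0 : n = 0 := by omega
    subst hn0
    have hfd : PySem.Int.floordiv (0 - 1) mbl = -1 := by
      rw [PySem.Int.floordiv_eq_iff_of_pos hm]
      constructor <;> nlinarith
    rw [hfd]
    simp

theorem pvSliceNonempty (idx : List Int) (st mbl : Int) (hm : 0 < mbl)
    (hst : st ∈ PySem.List.pyRange 0 (idx.length : Int) mbl) :
    0 < (PySem.List.slice idx (some st) (some (st + mbl))).length := by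
  obtain ⟨h1, h2, _⟩ := (PySem.List.mem_pyRange_iff_of_pos hm st).mp hst
  rw [PySem.List.slice_toNat idx h1 (by omega)]
  simp only [List.length_take, List.length_drop]
  omega

theorem pvScatterBisect (lengths bl : List Int)
    (hcov : ∀ x ∈ lengths, PySem.List.bisectLeft bl x < bl.length) :
    ((PySem.List.enumerate lengths).foldl (fun idxs p =>
        PySem.List.pySetD idxs ((PySem.List.bisectLeft bl p.2 : Nat) : Int)
          (PySem.List.pyGetD idxs ((PySem.List.bisectLeft bl p.2 : Nat) : Int) [] ++ [p.1]))
        (bl.map (fun _ => ([] : List Int))))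
      = (List.range bl.length).map (fun j =>
          ((PySem.List.enumerate lengths).filter
            (fun q => PySem.List.bisectLeft bl q.2 == j)).map (fun q => q.1)) := by
  have hcov' : ∀ p ∈ PySem.List.enumerate lengths,
      (fun x => PySem.List.bisectLeft bl x) p.2 < (bl.map (fun _ => ([] : List Int))).length := by
    intro p hp
    simp only [List.length_map]
    obtain ⟨k, hk, rfl⟩ := (PySem.List.mem_enumerate_iff lengths 0 p).mp hp
    exact hcov _ (List.getElem_mem hk)
  obtain ⟨hlen, hget⟩ := pvScatter (fun x => PySem.List.bisectLeft bl x)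
    (PySem.List.enumerate lengths) (bl.map (fun _ => ([] : List Int))) hcov'
  apply List.ext_getElem
  · simpa using hlen
  · intro j h1 h2
    have hjN : j < bl.length := by simpa using h2
    have hgd := hget j (by simpa using hjN)
    rw [List.getD_eq_getElem _ _ h1] at hgd
    rw [List.getD_eq_getElem _ _ (by simpa using hjN)] at hgd
    simp only [List.getElem_map] at hgd
    rw [hgd]
    simp

theorem pvFlatMapZipIdxSnd {α β : Type} (l : List α) (h : Nat → List β) : ∀ (k : Nat),
    (l.zipIdx k).flatMap (fun p => h p.2) = (List.range' k l.length).flatMap h := by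
  induction l with
  | nil => intro k; simp
  | cons a t ih =>
      intro k
      rw [List.zipIdx_cons, List.length_cons, List.range'_succ]
      simp only [List.flatMap_cons, ih (k + 1)]

theorem pvAssembleEq (lengths : List Int) (mbl : Int) (bl : List Int)
    (hpw : bl.Pairwise (· < ·))
    (hcov : ∀ x ∈ lengths, PySem.List.bisectLeft bl x < bl.length) :
    pvAssembleA lengths mbl bl = pvGatherB lengths mbl bl := by
  have hpwle : bl.Pairwise (· ≤ ·) := hpw.imp (fun h => le_of_lt h)
  have hGaux : pvGatherB lengths mbl bl = pvGaux lengths mbl none bl := by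
    unfold pvGatherB
    rw [pvFoldGaux]
    simp
  have hMain := pvMainGather lengths bl mbl hpwle bl 0 none (by simp) (by simp)
  have hScat := pvScatterBisect lengths bl hcov
  have hzip : bl.zip ((List.range bl.length).map (fun j =>
      ((PySem.List.enumerate lengths).filter
        (fun q => PySem.List.bisectLeft bl q.2 == j)).map (fun q => q.1)))
      = bl.zipIdx.map (fun p => (p.1, ((PySem.List.enumerate lengths).filter
          (fun q => PySem.List.bisectLeft bl q.2 == p.2)).map (fun q => q.1))) :=
    pvZipRangeMap0 bl _
  unfold pvAssembleA
  simp only [hScat]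
  by_cases hm1 : mbl = -1
  · rw [if_neg (by simp [hm1])]
    rw [hzip, pvFilterEqFlatMap, hGaux, ← hMain]
    congr 1
    funext a
    rw [pvChunkB, if_pos hm1]
    rcases a with ⟨L, idx⟩
    cases idx <;> simp
  · rw [if_pos (by simp [hm1])]
    rcases lt_trichotomy mbl 0 with hneg | hz | hpos
    · have hidxC : ((List.range bl.length).map (fun j =>
          ((PySem.List.enumerate lengths).filter
            (fun q => PySem.List.bisectLeft bl q.2 == j)).map (fun q => q.1))).flatMap
          (fun ci => (PySem.List.pyRange 0 (ci.length : Int) mbl).map (fun st =>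
            PySem.List.slice ci (some st) (some (st + mbl)))) = [] := by
        apply List.flatMap_eq_nil_iff.mpr
        intro ci _
        rw [pvPyRangeNegEmpty _ _ (by positivity) hneg]
        simp
      rw [hidxC, List.zip_nil_right]
      rw [hGaux, pvGauxEmptyChunks lengths mbl hm1
        (fun n hn => pvPyRangeNegEmpty n mbl hn hneg) bl none]
      simp
    · subst hz
      have hidxC : ((List.range bl.length).map (fun j =>
          ((PySem.List.enumerate lengths).filter
            (fun q => PySem.List.bisectLeft bl q.2 == j)).map (fun q => q.1))).flatMap
          (fun ci => (PySem.List.pyRange 0 (ci.length : Int) 0).map (fun st =>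
            PySem.List.slice ci (some st) (some (st + 0)))) = [] := by
        apply List.flatMap_eq_nil_iff.mpr
        intro ci _
        rw [pvPyRangeZero]
        simp
      rw [hidxC, List.zip_nil_right]
      rw [hGaux, pvGauxEmptyChunks lengths 0 hm1 (fun n _ => pvPyRangeZero 0 n) bl none]
      simp
    · set cnt : List Int → List (List Int) := fun ci =>
        (PySem.List.pyRange 0 (ci.length : Int) mbl).map (fun st =>
          PySem.List.slice ci (some st) (some (st + mbl))) with hcnt
      rw [hzip, pvFilterFlatMap]
      have hrep : (fun p : Int × List Int =>
            if decide (0 < p.2.length) = true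
            then List.replicate (PySem.Int.floordiv ((p.2.length : Int) - 1) mbl + 1).toNat p.1
            else [])
          = fun p : Int × List Int => List.replicate (cnt p.2).length p.1 := by
        funext p
        rw [hcnt]
        simp only [List.length_map]
        rw [pvChunkCount ((p.2.length : Int)) mbl (by positivity) hpos]
        by_cases h : 0 < p.2.length
        · rw [if_pos (by simpa using h)]
        · rw [if_neg (by simpa using h)]
          have h0 : p.2.length = 0 := by omega
          simp only [h0, Nat.cast_zero]
          have hfd : PySem.Int.floordiv ((0 : Int) - 1) mbl = -1 := by
            rw [PySem.Int.floordiv_eq_iff_of_pos hpos]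
            constructor <;> nlinarith
          rw [hfd]
          simp
      rw [hrep]
      have hidx : ((List.range bl.length).map (fun j =>
          ((PySem.List.enumerate lengths).filter
            (fun q => PySem.List.bisectLeft bl q.2 == j)).map (fun q => q.1))).flatMap
          (fun ci => (PySem.List.pyRange 0 (ci.length : Int) mbl).map (fun st =>
            PySem.List.slice ci (some st) (some (st + mbl))))
          = (bl.zipIdx.map (fun p => (p.1, ((PySem.List.enumerate lengths).filter
              (fun q => PySem.List.bisectLeft bl q.2 == p.2)).map (fun q => q.1)))).flatMap
            (fun p => cnt p.2) := by
        rw [List.flatMap_map, List.flatMap_map]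
        have h2 := pvFlatMapZipIdxSnd bl (fun j => cnt
          (((PySem.List.enumerate lengths).filter
            (fun q => PySem.List.bisectLeft bl q.2 == j)).map (fun q => q.1))) 0
        rw [← List.range_eq_range'] at h2
        rw [← h2]
      rw [hidx, pvZipFlat]
      rw [List.filter_eq_self.mpr (by
        intro a ha
        obtain ⟨p, _, hp⟩ := List.mem_flatMap.mp ha
        obtain ⟨c, hc, rfl⟩ := List.mem_map.mp hp
        rw [hcnt] at hc
        obtain ⟨st, hst, rfl⟩ := List.mem_map.mp hc
        simpa using pvSliceNonempty _ st mbl hpos hst)]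
      rw [hGaux, ← hMain]
      congr 1
      funext p
      rw [pvChunkB, if_neg hm1]
      rw [hcnt, List.map_map]
      rfl

theorem pvMBLcore_eq_recs (lengths : List Int) (bn : Int) :
    pvMBLcore lengths bn = pvRecs 0 ((PySem.List.pyRange 0 bn 1).map
      (pvPick (PySem.List.sorted lengths (fun x => x)) (lengths.length : Int) bn)) := by
  simp only [pvMBLcore]
  rw [pvFoldPick]
  simp

theorem pvCover (lengths bl : List Int) (hpw : bl.Pairwise (· ≤ ·))
    (hmem : ∃ Mx ∈ bl, ∀ x ∈ lengths, x ≤ Mx) :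
    ∀ x ∈ lengths, PySem.List.bisectLeft bl x < bl.length := by
  intro x hx
  obtain ⟨Mx, hM, hle⟩ := hmem
  obtain ⟨jM, hjM, rfl⟩ := List.mem_iff_getElem.mp hM
  obtain ⟨hble, hlt, hge⟩ := PySem.List.bisectLeft_spec bl x hpw
  by_contra hc
  have h1 : bl[jM] < x := hlt jM hjM (by omega)
  have h2 := hle x hx
  omega

-- ===== VERDICT (by name: the statement is the Claim_ definition above) =====
theorem collect_buckets_spec : Claim_equal_collect_buckets := by
  unfold Claim_equal_collect_buckets
  intro lengths bn? mbl _ hpre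
  unfold Spec_collect_buckets
  unfold Pre_collect_buckets at hpre
  obtain ⟨hdz, hpre2⟩ := hpre
  have hA : collect_buckets lengths bn? mbl
      = pvAssembleA lengths mbl (pvMBLcore lengths (pvEffBn lengths bn? mbl)) := by
    cases bn? <;> rfl
  have hB : collect_buckets_alt lengths bn? mbl
      = pvGatherB lengths mbl (pvMBLcore lengths (pvEffBn lengths bn? mbl)) := by
    cases bn? <;> rfl
  rw [hA, hB]
  set bn : Int := pvEffBn lengths bn? mbl with hbn
  rw [pvMBLcore_eq_recs]
  set P := (PySem.List.pyRange 0 bn 1).map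
    (pvPick (PySem.List.sorted lengths (fun x => x)) (lengths.length : Int) bn) with hPdef
  have hpw : (pvRecs 0 P).Pairwise (· < ·) := pvRecs_pw P 0
  apply pvAssembleEq lengths mbl (pvRecs 0 P) hpw
  by_cases hnil : lengths = []
  · intro x hx
    rw [hnil] at hx
    simp at hx
  · rw [if_neg hnil] at hpre2
    obtain ⟨hmbl0, hbn1, hpos⟩ := hpre2
    have hsne : PySem.List.sorted lengths (fun x => x) ≠ [] := by
      rw [Ne, PySem.List.sorted_eq_nil_iff]
      exact hnil
    have hm1 : (1 : Int) ≤ (lengths.length : Int) := by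
      have : lengths.length ≠ 0 := fun h => hnil (List.eq_nil_of_length_eq_zero h)
      omega
    have hslen : (PySem.List.sorted lengths (fun x => x)).length = lengths.length :=
      PySem.List.length_sorted lengths _ false
    have hle_M : ∀ x ∈ lengths, x ≤ (PySem.List.sorted lengths (fun x => x)).getLast hsne := by
      intro x hxm
      exact pvSorted_le_getLast lengths hsne x
        ((PySem.List.mem_sorted lengths _ false x).mpr hxm)
    -- the last pick (i = bn - 1) is exactly the maximum of lengths
    have hpickLast : pvPick (PySem.List.sorted lengths (fun x => x)) (lengths.length : Int) bn (bn - 1)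
        = (PySem.List.sorted lengths (fun x => x)).getLast hsne := by
      unfold pvPick
      have harg : (lengths.length : Int) * (bn - 1 + 1) = (lengths.length : Int) * bn := by ring
      rw [harg]
      have hfd : PySem.Int.floordiv ((lengths.length : Int) * bn) bn
          = (lengths.length : Int) := by
        rw [PySem.Int.floordiv_eq_ediv_of_pos (by omega)]
        exact Int.mul_ediv_cancel _ (by omega)
      rw [hfd]
      rw [PySem.List.pyGetD_eq_getElem _ _ (by omega) (by omega)]
      rw [List.getLast_eq_getElem]
      congr 1
      omega
    have hpickMem : pvPick (PySem.List.sorted lengths (fun x => x)) (lengths.length : Int) bn (bn - 1) ∈ P := by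
      rw [hPdef]
      exact List.mem_map.mpr ⟨bn - 1, PySem.List.mem_pyRange_one.mpr ⟨by omega, by omega⟩, rfl⟩
    have hMpos : 0 < (PySem.List.sorted lengths (fun x => x)).getLast hsne := by
      obtain ⟨x, hxm, hxp⟩ := hpos
      have := hle_M x hxm
      omega
    have hlastP : (PySem.List.sorted lengths (fun x => x)).getLast hsne ≤ pvLast 0 P := by
      rw [← hpickLast]
      exact pvLast_ge P 0 _ hpickMem
    apply pvCover lengths (pvRecs 0 P) (hpw.imp (fun h => le_of_lt h))
    refine ⟨pvLast 0 P, pvLast_mem P 0 (by omega), ?_⟩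
    intro x hxm
    have := hle_M x hxm
    omega
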